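-- pv_equiv track=rewrite | github.com/jennleww/wordle-solver | src/error_analysis.py | analyze_word_properties
-- ===== SOURCE A (Python) =====
-- def analyze_word_properties(word):
--     return {
--         'length': len(word),
--         'unique_letters': len(set(word)),
--         'vowel_count': sum(1 for c in word if c in 'aeiou'),
--         'common_letters': sum(1 for c in word if c in 'etaoinshrdlu'),
--         'repeated_letters': len(word) - len(set(word))
--     }
-- ===== SOURCE B (Python) =====
-- def analyze_word_properties(word):
--     # Build a letter-frequency histogram once, then derive every statistic
--     # from the counts over the DISTINCT letters (not from rescanning the word).
--     counts = {}
--     for c in word: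
--         counts[c] = counts.get(c, 0) + 1
--     length = sum(counts.values())
--     vowels = sum(n for c, n in counts.items() if c in 'aeiou')
--     common = sum(n for c, n in counts.items() if c in 'etaoinshrdlu')
--     return {
--         'length': length,
--         'unique_letters': len(counts),
--         'vowel_count': vowels,
--         'common_letters': common,
--         'repeated_letters': length - len(counts)
--     }
-- ===== Notes on version B (the rewrite author's own statement) =====
-- stated objective: alternative
-- what changed: B builds a letter-frequency histogram (dict) in one pass and derives all five statistics from the counts over the distinct letters, instead of A's five independent scans/set-constructions over the word's positions.
import Mathlib
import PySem

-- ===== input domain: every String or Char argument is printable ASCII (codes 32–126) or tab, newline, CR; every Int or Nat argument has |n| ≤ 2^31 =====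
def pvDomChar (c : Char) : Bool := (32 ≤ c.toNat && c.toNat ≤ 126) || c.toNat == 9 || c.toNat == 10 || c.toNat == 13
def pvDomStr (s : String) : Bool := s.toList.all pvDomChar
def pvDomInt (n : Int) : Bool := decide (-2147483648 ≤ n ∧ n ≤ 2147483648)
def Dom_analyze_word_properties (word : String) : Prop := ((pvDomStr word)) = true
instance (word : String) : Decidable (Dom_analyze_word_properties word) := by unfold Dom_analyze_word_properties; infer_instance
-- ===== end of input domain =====

-- B builds a letter-frequency histogram once and derives all five statistics from the
-- counts over the distinct letters, instead of A's five independent scans (alternative, same cost).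

-- ===== PORT A =====
def analyze_word_properties (word : String) : List (String × Int) :=
  let cs := word.toList
  [("length", (cs.length : Int)),
   ("unique_letters", ((PySem.Set.ofList cs).length : Int)),
   ("vowel_count", cs.foldl (fun a c => if c ∈ "aeiou".toList then a + 1 else a) (0 : Int)),
   ("common_letters", cs.foldl (fun a c => if c ∈ "etaoinshrdlu".toList then a + 1 else a) (0 : Int)),
   ("repeated_letters", (cs.length : Int) - ((PySem.Set.ofList cs).length : Int))]

-- ===== PORT B =====
-- counts[c] = counts.get(c, 0) + 1 loop, then sums over the histogram's items
def analyze_word_properties_alt (word : String) : List (String × Int) :=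
  let counts := word.toList.foldl
    (fun (d : PySem.Dict Char Int) c => d.insert c (d.getD c 0 + 1)) PySem.Dict.empty
  let length := counts.values.sum
  let vowels := ((counts.items.filter (fun p => p.1 ∈ "aeiou".toList)).map (·.2)).sum
  let common := ((counts.items.filter (fun p => p.1 ∈ "etaoinshrdlu".toList)).map (·.2)).sum
  [("length", length),
   ("unique_letters", (counts.size : Int)),
   ("vowel_count", vowels),
   ("common_letters", common),
   ("repeated_letters", length - (counts.size : Int))]

-- ===== PRECONDITION & SPEC =====
def Spec_analyze_word_properties (word : String) (out : List (String × Int)) : Prop := out = analyze_word_properties_alt word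
instance (word : String) (out : List (String × Int)) : Decidable (Spec_analyze_word_properties word out) := by unfold Spec_analyze_word_properties; infer_instance

-- ===== CLAIM =====
def Claim_equal_analyze_word_properties : Prop := ∀ (word : String), Dom_analyze_word_properties word → Spec_analyze_word_properties word (analyze_word_properties word)

-- ===== LEMMAS AND PROOFS =====
-- B's ordered distinct-letter list is a permutation of Mathlib's dedup (same members, both nodup).
theorem pv_perm_dedup (cs : List Char) : (PySem.Set.ofList cs).Perm cs.dedup := by
  refine (List.perm_ext_iff_of_nodup (PySem.Set.nodup_ofList _) cs.nodup_dedup).2 ?_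
  intro x
  simp [PySem.Set.mem_ofList, List.mem_dedup]

-- Summing the multiplicities of the distinct letters that satisfy p counts the positions satisfying p.
theorem pv_sum_count_filter (cs : List Char) (p : Char → Bool) :
    (((PySem.Set.ofList cs).filter p).map (fun k => (cs.count k : Int))).sum
      = (cs.countP p : Int) := by
  have hperm := ((pv_perm_dedup cs).filter p).map (fun k => (cs.count k : Int))
  rw [hperm.sum_eq]
  have h := List.sum_map_count_dedup_filter_eq_countP p cs
  calc ((cs.dedup.filter p).map (fun k => (cs.count k : Int))).sum
      = (((cs.dedup.filter p).map (fun k => cs.count k)).map (Nat.cast : ℕ → ℤ)).sum := by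
        simp [List.map_map, Function.comp_def]
    _ = (((cs.dedup.filter p).map (fun k => cs.count k)).sum : Int) := (Nat.cast_list_sum _).symm
    _ = (cs.countP p : Int) := by rw [h]

theorem analyze_word_properties_eq (word : String) :
    analyze_word_properties word = analyze_word_properties_alt word := by
  unfold analyze_word_properties analyze_word_properties_alt
  rw [PySem.Dict.foldl_insert_getD_add_one_eq_counter]
  set cs := word.toList with hcs
  have hitems := PySem.Dict.items_counter cs
  have hvals : (PySem.Dict.counter cs).values.sum = (cs.length : Int) := by
    show ((PySem.Dict.counter cs).items.map (·.2)).sum = (cs.length : Int)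
    rw [hitems, List.map_map]
    have := pv_sum_count_filter cs (fun _ => true)
    simpa [Function.comp] using this
  have hsize : ((PySem.Dict.counter cs).size : Int) = ((PySem.Set.ofList cs).length : Int) := by
    show (((PySem.Dict.counter cs).items.length : ℕ) : Int) = _
    rw [hitems]; simp
  have hcount : ∀ (p : Char → Bool),
      (((PySem.Dict.counter cs).items.filter (fun q => p q.1)).map (·.2)).sum
        = cs.foldl (fun a c => if p c then a + 1 else a) (0 : Int) := by
    intro p
    rw [PySem.List.foldl_count_if, hitems, List.filter_map]
    have := pv_sum_count_filter cs p
    simpa [Function.comp, List.map_map] using this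
  simp only [hvals, hsize, hcount (fun c => decide (c ∈ "aeiou".toList)),
    hcount (fun c => decide (c ∈ "etaoinshrdlu".toList))]
  simp

-- ===== VERDICT =====
theorem analyze_word_properties_spec : Claim_equal_analyze_word_properties := by
  intro word _
  unfold Spec_analyze_word_properties
  exact analyze_word_properties_eq word
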